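-- pv_equiv track=rewrite | github.com/qwerty22121998/Amethyst-Mod-Manager | src/gui/install_mod.py | _try_auto_strip_top_level
-- ===== SOURCE A (Python) =====
-- def _check_mod_top_level(file_list: list[tuple[str, str, bool]],
--                          required: set[str]) -> bool:
--     """Return True if at least one file's top-level folder matches a required name."""
--     for _, dst_rel, _ in file_list:
--         top = dst_rel.replace("\\", "/").split("/")[0].lower()
--         if top in required:
--             return True
--     return False
--
-- def _try_auto_strip_top_level(
--     file_list: list[tuple[str, str, bool]],
--     required: set[str],
--     max_strip_depth: int = 20,
-- ) -> tuple[list[tuple[str, str, bool]], bool]: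
--     """
--     Try stripping leading path segments until at least one file has a top-level
--     folder in required. Returns (new_file_list, True) if a strip depth worked,
--     otherwise (original file_list, False).
--     """
--     required_lower = {r.lower() for r in required}
--     if _check_mod_top_level(file_list, required_lower):
--         return (file_list, True)
--     for strip_depth in range(1, max_strip_depth + 1):
--         new_list: list[tuple[str, str, bool]] = []
--         has_required = False
--         for src_rel, dst_rel, is_folder in file_list:
--             parts = dst_rel.replace("\\", "/").strip("/").split("/")
--             if len(parts) <= strip_depth:
--                 continue
--             new_dst = "/".join(parts[strip_depth:])
--             top = parts[strip_depth].lower()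
--             if top in required_lower:
--                 has_required = True
--             new_list.append((src_rel, new_dst, is_folder))
--         if has_required and new_list:
--             return (new_list, True)
--     return (file_list, False)
-- ===== SOURCE B (Python) =====
-- def _try_auto_strip_top_level(
--     file_list: list[tuple[str, str, bool]],
--     required: set[str],
--     max_strip_depth: int = 20,
-- ) -> tuple[list[tuple[str, str, bool]], bool]:
--     """
--     Single-pass variant: instead of re-scanning the whole file list once per
--     candidate strip depth, compute each file's earliest matching segment depth
--     in one pass, take the minimum, and strip once at that depth.
--     """
--     required_lower = {r.lower() for r in required}
--     # Depth 0: the unstripped top-level segment (no '/'-stripping, as in the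
--     # original depth-0 check).
--     if any(dst.replace("\\", "/").split("/")[0].lower() in required_lower
--            for _, dst, _ in file_list):
--         return (file_list, True)
--     # One pass: earliest matching depth (>= 1) per file, global minimum.
--     best = None
--     for _, dst, _ in file_list:
--         parts = dst.replace("\\", "/").strip("/").split("/")
--         for i in range(1, len(parts)):
--             if parts[i].lower() in required_lower:
--                 if best is None or i < best:
--                     best = i
--                 break
--     if best is None or best > max_strip_depth:
--         return (file_list, False)
--     new_list = []
--     for src, dst, is_folder in file_list:
--         parts = dst.replace("\\", "/").strip("/").split("/")
--         if len(parts) > best: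
--             new_list.append((src, "/".join(parts[best:]), is_folder))
--     return (new_list, True)
-- ===== Notes on version B (the rewrite author's own statement) =====
-- stated objective: faster
-- what changed: Instead of re-scanning the whole file list once per candidate strip depth (depths 1..max_strip_depth), B computes each file's earliest matching segment depth in a single pass, takes the global minimum, and strips once at that depth.
import Mathlib
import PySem

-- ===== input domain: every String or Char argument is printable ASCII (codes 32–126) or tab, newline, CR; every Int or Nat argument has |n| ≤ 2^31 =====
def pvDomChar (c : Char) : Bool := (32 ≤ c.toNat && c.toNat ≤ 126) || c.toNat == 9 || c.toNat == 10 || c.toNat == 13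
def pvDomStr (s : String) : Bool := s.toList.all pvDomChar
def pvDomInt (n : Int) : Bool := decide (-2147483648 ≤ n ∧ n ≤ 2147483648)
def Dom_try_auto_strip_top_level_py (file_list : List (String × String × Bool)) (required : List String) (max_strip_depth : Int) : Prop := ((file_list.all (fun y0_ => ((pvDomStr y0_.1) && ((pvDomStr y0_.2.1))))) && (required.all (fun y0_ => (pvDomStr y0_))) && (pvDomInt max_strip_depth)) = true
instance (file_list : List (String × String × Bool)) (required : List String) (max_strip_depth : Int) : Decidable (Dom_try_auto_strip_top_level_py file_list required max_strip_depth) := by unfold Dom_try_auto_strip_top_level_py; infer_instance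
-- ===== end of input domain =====

-- B replaces A's per-depth rescans (one pass over all files for every candidate strip
-- depth 1..max_strip_depth) by a single pass computing each file's earliest matching
-- segment depth, taking the minimum and stripping once; objective: faster.


-- ===== PORT A =====

-- dst_rel.replace("\\", "/").split("/")[0].lower()  (split("/") is never empty, so the
-- [0] index cannot raise; pyGetD's default "" is unreachable)
def pvTop0 (dst : String) : List Char :=
  PySem.Chars.lower (PySem.List.pyGetD (PySem.Chars.splitOn (PySem.Chars.replace dst.toList ['\\'] ['/']) ['/']) 0 [])

-- dst_rel.replace("\\", "/").strip("/").split("/")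
def pvParts (dst : String) : List (List Char) :=
  PySem.Chars.splitOn (PySem.Chars.stripChars (PySem.Chars.replace dst.toList ['\\'] ['/']) ['/']) ['/']

-- _check_mod_top_level: scan with early return
def pvCheckA (req : PySem.Set (List Char)) : List (String × String × Bool) → Bool
  | [] => false
  | (_, dst, _) :: rest =>
    if PySem.Set.contains req (pvTop0 dst) then true else pvCheckA req rest

-- the inner 'for src_rel, dst_rel, is_folder in file_list' pass at one strip_depth,
-- threading (new_list, has_required)
def pvPassA (req : PySem.Set (List Char)) (d : Int) :
    List (String × String × Bool) → List (String × String × Bool) → Bool →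
    List (String × String × Bool) × Bool
  | [], newList, hasReq => (newList, hasReq)
  | (src, dst, isf) :: rest, newList, hasReq =>
    let parts := pvParts dst
    if (parts.length : Int) ≤ d then pvPassA req d rest newList hasReq
    else
      let newDst := String.ofList (PySem.Chars.join ['/'] (PySem.List.slice parts (some d) none))
      let hasReq' := if PySem.Set.contains req (PySem.Chars.lower (PySem.List.pyGetD parts d [])) then true else hasReq
      pvPassA req d rest (newList ++ [(src, newDst, isf)]) hasReq'

-- 'for strip_depth in range(1, max_strip_depth + 1)' with early return
def pvLoopA (req : PySem.Set (List Char)) (fl : List (String × String × Bool)) :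
    List Int → List (String × String × Bool) × Bool
  | [] => (fl, false)
  | d :: ds =>
    let r := pvPassA req d fl [] false
    if r.2 && !r.1.isEmpty then (r.1, true) else pvLoopA req fl ds

def try_auto_strip_top_level_py (file_list : List (String × String × Bool)) (required : List String) (max_strip_depth : Int) : (List (String × String × Bool)) × Bool :=
  let req := PySem.Set.ofList (required.map (fun r => PySem.Chars.lower r.toList))
  if pvCheckA req file_list then (file_list, true)
  else pvLoopA req file_list (PySem.List.pyRange 1 (max_strip_depth + 1) 1)

-- ===== PORT B =====

-- B's inner 'for i in range(1, len(parts)): … break': earliest i ≥ start with a match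
def pvFirstMatch (req : PySem.Set (List Char)) (parts : List (List Char)) (i : Nat) : Option Nat :=
  if h : i < parts.length then
    if PySem.Set.contains req (PySem.Chars.lower parts[i]) then some i
    else pvFirstMatch req parts (i + 1)
  else none
termination_by parts.length - i

-- B's single pass: fold the running minimum 'best' over the files
def pvBest (req : PySem.Set (List Char)) :
    List (String × String × Bool) → Option Nat → Option Nat
  | [], best => best
  | (_, dst, _) :: rest, best =>
    let best' :=
      match pvFirstMatch req (pvParts dst) 1 with
      | none => best
      | some i =>
        match best with
        | none => some i
        | some b => if i < b then some i else some b
    pvBest req rest best'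

-- B's final build pass at the chosen depth
def pvBuildB (b : Nat) : List (String × String × Bool) → List (String × String × Bool)
  | [] => []
  | (src, dst, isf) :: rest =>
    let parts := pvParts dst
    if (b : Int) < (parts.length : Int) then
      (src, String.ofList (PySem.Chars.join ['/'] (PySem.List.slice parts (some (b : Int)) none)), isf) :: pvBuildB b rest
    else pvBuildB b rest

def try_auto_strip_top_level_py_alt (file_list : List (String × String × Bool)) (required : List String) (max_strip_depth : Int) : (List (String × String × Bool)) × Bool :=
  let req := PySem.Set.ofList (required.map (fun r => PySem.Chars.lower r.toList))
  if file_list.any (fun f => PySem.Set.contains req (pvTop0 f.2.1)) then (file_list, true)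
  else
    match pvBest req file_list none with
    | none => (file_list, false)
    | some b =>
      if (b : Int) > max_strip_depth then (file_list, false)
      else (pvBuildB b file_list, true)

-- ===== PRECONDITION & SPEC =====
def Spec_try_auto_strip_top_level_py (file_list : List (String × String × Bool)) (required : List String) (max_strip_depth : Int) (out : (List (String × String × Bool)) × Bool) : Prop := out = try_auto_strip_top_level_py_alt file_list required max_strip_depth
instance (file_list : List (String × String × Bool)) (required : List String) (max_strip_depth : Int) (out : (List (String × String × Bool)) × Bool) : Decidable (Spec_try_auto_strip_top_level_py file_list required max_strip_depth out) := by unfold Spec_try_auto_strip_top_level_py; infer_instance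

-- ===== CLAIM (what is proved, stated in full; the proofs are below) =====
def Claim_equal_try_auto_strip_top_level_py : Prop := ∀ (file_list : List (String × String × Bool)) (required : List String) (max_strip_depth : Int), Dom_try_auto_strip_top_level_py file_list required max_strip_depth → Spec_try_auto_strip_top_level_py file_list required max_strip_depth (try_auto_strip_top_level_py file_list required max_strip_depth)

-- ===== LEMMAS AND PROOFS =====

-- 'some file still has > d segments and its segment at depth d matches'
def pvAnyI (req : PySem.Set (List Char)) (fl : List (String × String × Bool)) (d : Int) : Bool :=
  fl.any (fun f =>
    let ps := pvParts f.2.1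
    !decide ((ps.length : Int) ≤ d) && PySem.Set.contains req (PySem.Chars.lower (PySem.List.pyGetD ps d [])))

-- the list A's pass at depth d accumulates
def pvStripped (req : PySem.Set (List Char)) (d : Int) :
    List (String × String × Bool) → List (String × String × Bool)
  | [] => []
  | (src, dst, isf) :: rest =>
    let parts := pvParts dst
    if (parts.length : Int) ≤ d then pvStripped req d rest
    else (src, String.ofList (PySem.Chars.join ['/'] (PySem.List.slice parts (some d) none)), isf) :: pvStripped req d rest

theorem pvPassA_eq (req : PySem.Set (List Char)) (d : Int) :
    ∀ (fs : List (String × String × Bool)) (acc : List (String × String × Bool)) (hr : Bool),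
      pvPassA req d fs acc hr = (acc ++ pvStripped req d fs, hr || pvAnyI req fs d) := by
  intro fs
  induction fs with
  | nil => intro acc hr; simp [pvPassA, pvStripped, pvAnyI]
  | cons f rest ih =>
    intro acc hr
    obtain ⟨src, dst, isf⟩ := f
    simp only [pvPassA, pvStripped]
    split_ifs with h hc
    · rw [ih]; simp [pvAnyI, h]
    · rw [ih]
      have hm := (PySem.Set.contains_iff _ _).mp hc
      simp [pvAnyI, h, hm]
    · rw [ih]
      have hm : PySem.Chars.lower (PySem.List.pyGetD (pvParts dst) d []) ∉ req :=
        fun x => hc ((PySem.Set.contains_iff _ _).mpr x)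
      simp [pvAnyI, h, hm]


theorem pvStripped_ne_nil (req : PySem.Set (List Char)) (d : Int)
    (fs : List (String × String × Bool)) (h : pvAnyI req fs d = true) :
    (pvStripped req d fs).isEmpty = false := by
  induction fs with
  | nil => simp [pvAnyI] at h
  | cons f rest ih =>
    obtain ⟨src, dst, isf⟩ := f
    simp only [pvAnyI, List.any_cons, Bool.or_eq_true] at h
    simp only [pvStripped]
    split_ifs with hlen
    · apply ih
      rcases h with h | h
      · simp [hlen] at h
      · exact h
    · simp


theorem pvBuildB_eq (req : PySem.Set (List Char)) (b : Nat)
    (fs : List (String × String × Bool)) :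
    pvBuildB b fs = pvStripped req (b : Int) fs := by
  induction fs with
  | nil => rfl
  | cons f rest ih =>
    obtain ⟨src, dst, isf⟩ := f
    simp only [pvBuildB, pvStripped]
    split_ifs with h1 h2 h2 <;> first | (exfalso; omega) | simp [ih]


theorem pvCheckA_eq (req : PySem.Set (List Char)) (fs : List (String × String × Bool)) :
    pvCheckA req fs = fs.any (fun f => PySem.Set.contains req (pvTop0 f.2.1)) := by
  induction fs with
  | nil => rfl
  | cons f rest ih =>
    obtain ⟨src, dst, isf⟩ := f
    simp only [pvCheckA, List.any_cons, ih]
    split_ifs with h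
    · rw [h, Bool.true_or]
    · simp only [Bool.not_eq_true] at h
      rw [h, Bool.false_or]


theorem pvLoopA_none (req : PySem.Set (List Char)) (fl : List (String × String × Bool))
    (m : Int) (lo : Int)
    (h : ∀ d, lo ≤ d → d ≤ m → pvAnyI req fl d = false) :
    pvLoopA req fl (PySem.List.pyRange lo (m + 1) 1) = (fl, false) := by
  have main : ∀ (k : Nat) (lo : Int), (m + 1 - lo).toNat = k →
      (∀ d, lo ≤ d → d ≤ m → pvAnyI req fl d = false) →
      pvLoopA req fl (PySem.List.pyRange lo (m + 1) 1) = (fl, false) := by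
    intro k
    induction k with
    | zero =>
      intro lo hk _
      rw [PySem.List.pyRange_one_eq_nil (by omega)]
      rfl
    | succ n ih =>
      intro lo hk hno
      rw [PySem.List.pyRange_one_cons (by omega)]
      simp only [pvLoopA]
      rw [pvPassA_eq]
      simp only [List.nil_append]
      rw [hno lo (by omega) (by omega)]
      simp only [Bool.or_false, Bool.false_and]
      exact ih (lo + 1) (by omega) (fun d hd1 hd2 => hno d (by omega) hd2)
  exact main (m + 1 - lo).toNat lo rfl h


theorem pvLoopA_found (req : PySem.Set (List Char)) (fl : List (String × String × Bool))
    (m : Int) (lo b : Int)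
    (hlo : lo ≤ b) (hbm : b ≤ m) (hb : pvAnyI req fl b = true)
    (hmin : ∀ d, lo ≤ d → d < b → pvAnyI req fl d = false) :
    pvLoopA req fl (PySem.List.pyRange lo (m + 1) 1) = (pvStripped req b fl, true) := by
  have main : ∀ (k : Nat) (lo : Int), (b - lo).toNat = k → lo ≤ b →
      (∀ d, lo ≤ d → d < b → pvAnyI req fl d = false) →
      pvLoopA req fl (PySem.List.pyRange lo (m + 1) 1) = (pvStripped req b fl, true) := by
    intro k
    induction k with
    | zero =>
      intro lo hk hlo' _
      have hlb : lo = b := by omega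
      subst hlb
      rw [PySem.List.pyRange_one_cons (by omega)]
      simp only [pvLoopA]
      rw [pvPassA_eq]
      simp only [List.nil_append, Bool.false_or]
      rw [hb, pvStripped_ne_nil req lo fl hb]
      simp
    | succ n ih =>
      intro lo hk hlo' hm
      rw [PySem.List.pyRange_one_cons (by omega)]
      simp only [pvLoopA]
      rw [pvPassA_eq]
      simp only [List.nil_append, Bool.false_or]
      rw [hm lo (by omega) (by omega)]
      simp only [Bool.false_and]
      exact ih (lo + 1) (by omega) (by omega) (fun d hd1 hd2 => hm d (by omega) hd2)
  exact main (b - lo).toNat lo rfl hlo hmin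


-- matching at depth i (Nat form used by B's helpers)
def pvMatchN (req : PySem.Set (List Char)) (ps : List (List Char)) (i : Nat) : Bool :=
  !decide ((ps.length : Int) ≤ (i : Int)) && PySem.Set.contains req (PySem.Chars.lower (PySem.List.pyGetD ps (i : Int) []))

theorem pvMatchN_of_lt (req : PySem.Set (List Char)) (ps : List (List Char)) (i : Nat)
    (h : i < ps.length) :
    pvMatchN req ps i = PySem.Set.contains req (PySem.Chars.lower ps[i]) := by
  simp only [pvMatchN, PySem.List.pyGetD_natCast, List.getD_eq_getElem?_getD,
    List.getElem?_eq_getElem h, Option.getD_some]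
  have : ¬ ((ps.length : Int) ≤ (i : Nat)) := by exact_mod_cast Nat.not_le.mpr h
  simp [this]

theorem pvMatchN_of_ge (req : PySem.Set (List Char)) (ps : List (List Char)) (i : Nat)
    (h : ps.length ≤ i) : pvMatchN req ps i = false := by
  have : ((ps.length : Int) ≤ (i : Nat)) := by exact_mod_cast h
  simp [pvMatchN, this]

theorem pvFirstMatch_some (req : PySem.Set (List Char)) (ps : List (List Char)) :
    ∀ (i j : Nat), pvFirstMatch req ps i = some j →
      i ≤ j ∧ pvMatchN req ps j = true ∧ ∀ k, i ≤ k → k < j → pvMatchN req ps k = false := by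
  have main : ∀ (n i j : Nat), ps.length - i = n → pvFirstMatch req ps i = some j →
      i ≤ j ∧ pvMatchN req ps j = true ∧ ∀ k, i ≤ k → k < j → pvMatchN req ps k = false := by
    intro n
    induction n with
    | zero =>
      intro i j hn hfm
      rw [pvFirstMatch, dif_neg (by omega)] at hfm
      exact absurd hfm (by simp)
    | succ n ih =>
      intro i j hn hfm
      rw [pvFirstMatch] at hfm
      by_cases hi : i < ps.length
      · rw [dif_pos hi] at hfm
        by_cases hc : PySem.Set.contains req (PySem.Chars.lower ps[i]) = true
        · rw [if_pos hc] at hfm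
          obtain rfl : i = j := by injection hfm
          exact ⟨le_refl _, by rw [pvMatchN_of_lt req ps i hi]; exact hc, fun k h1 h2 => by omega⟩
        · rw [if_neg hc] at hfm
          obtain ⟨h1, h2, h3⟩ := ih (i+1) j (by omega) hfm
          refine ⟨by omega, h2, fun k hk1 hk2 => ?_⟩
          rcases Nat.eq_or_lt_of_le hk1 with heq | hk
          · subst heq
            rw [pvMatchN_of_lt req ps i hi]
            exact Bool.not_eq_true _ |>.mp hc
          · exact h3 k (by omega) hk2
      · rw [dif_neg hi] at hfm
        exact absurd hfm (by simp)
  exact fun i j => main (ps.length - i) i j rfl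


theorem pvFirstMatch_none (req : PySem.Set (List Char)) (ps : List (List Char)) :
    ∀ (i : Nat), pvFirstMatch req ps i = none →
      ∀ k, i ≤ k → pvMatchN req ps k = false := by
  have main : ∀ (n i : Nat), ps.length - i = n → pvFirstMatch req ps i = none →
      ∀ k, i ≤ k → pvMatchN req ps k = false := by
    intro n
    induction n with
    | zero =>
      intro i hn _ k hk
      exact pvMatchN_of_ge req ps k (by omega)
    | succ n ih =>
      intro i hn hfm k hk
      have hi : i < ps.length := by omega
      rw [pvFirstMatch, dif_pos hi] at hfm
      by_cases hc : PySem.Set.contains req (PySem.Chars.lower ps[i]) = true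
      · rw [if_pos hc] at hfm; exact absurd hfm (by simp)
      · rw [if_neg hc] at hfm
        rcases Nat.eq_or_lt_of_le hk with heq | hik
        · subst heq
          rw [pvMatchN_of_lt req ps i hi]
          exact Bool.not_eq_true _ |>.mp hc
        · exact ih (i+1) (by omega) hfm k (by omega)
  exact fun i => main (ps.length - i) i rfl


theorem pvBest_none (req : PySem.Set (List Char)) :
    ∀ (fs : List (String × String × Bool)) (acc : Option Nat),
      pvBest req fs acc = none →
      acc = none ∧ ∀ f ∈ fs, pvFirstMatch req (pvParts f.2.1) 1 = none := by
  intro fs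
  induction fs with
  | nil => intro acc h; exact ⟨h, by simp⟩
  | cons f rest ih =>
    intro acc h
    obtain ⟨src, dst, isf⟩ := f
    simp only [pvBest] at h
    rcases hfm : pvFirstMatch req (pvParts dst) 1 with _ | i
    · rw [hfm] at h
      obtain ⟨h1, h2⟩ := ih acc h
      exact ⟨h1, by simpa [hfm] using h2⟩
    · rw [hfm] at h
      obtain ⟨h1, -⟩ := ih _ h
      rcases acc with _ | b
      · exact absurd h1 (by simp)
      · exfalso; by_cases hib : i < b <;> simp [hib] at h1


theorem pvBest_some (req : PySem.Set (List Char)) :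
    ∀ (fs : List (String × String × Bool)) (acc : Option Nat) (b : Nat),
      pvBest req fs acc = some b →
      (acc = some b ∨ ∃ f ∈ fs, pvFirstMatch req (pvParts f.2.1) 1 = some b) ∧
      (∀ a, acc = some a → b ≤ a) ∧
      (∀ f ∈ fs, ∀ j, pvFirstMatch req (pvParts f.2.1) 1 = some j → b ≤ j) := by
  intro fs
  induction fs with
  | nil =>
    intro acc b h
    simp only [pvBest] at h
    exact ⟨Or.inl h, fun a ha => by rw [h] at ha; injection ha with ha; omega, by simp⟩
  | cons f rest ih =>
    intro acc b h
    obtain ⟨src, dst, isf⟩ := f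
    simp only [pvBest] at h
    rcases hfm : pvFirstMatch req (pvParts dst) 1 with _ | i <;> rw [hfm] at h
    · obtain ⟨h1, h2, h3⟩ := ih acc b h
      refine ⟨?_, h2, ?_⟩
      · rcases h1 with h1 | ⟨g, hg, hgm⟩
        · exact Or.inl h1
        · exact Or.inr ⟨g, List.mem_cons_of_mem _ hg, hgm⟩
      · intro g hg j hj
        rcases List.mem_cons.mp hg with rfl | hg'
        · rw [hfm] at hj; exact absurd hj (by simp)
        · exact h3 g hg' j hj
    · -- acc' is the min of acc and i
      rcases acc with _ | a
      · obtain ⟨h1, h2, h3⟩ := ih (some i) b h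
        refine ⟨?_, by simp, ?_⟩
        · rcases h1 with h1 | ⟨g, hg, hgm⟩
          · injection h1 with h1; subst h1
            exact Or.inr ⟨(src, dst, isf), List.mem_cons_self, hfm⟩
          · exact Or.inr ⟨g, List.mem_cons_of_mem _ hg, hgm⟩
        · intro g hg j hj
          rcases List.mem_cons.mp hg with rfl | hg'
          · rw [hfm] at hj; injection hj with hj; subst hj
            exact h2 _ rfl
          · exact h3 g hg' j hj
      · by_cases hia : i < a <;> simp only [hia, if_pos, ite_false] at h
        · obtain ⟨h1, h2, h3⟩ := ih (some i) b h
          refine ⟨?_, ?_, ?_⟩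
          · rcases h1 with h1 | ⟨g, hg, hgm⟩
            · injection h1 with h1; subst h1
              exact Or.inr ⟨(src, dst, isf), List.mem_cons_self, hfm⟩
            · exact Or.inr ⟨g, List.mem_cons_of_mem _ hg, hgm⟩
          · intro a' ha'; injection ha' with ha'; subst ha'
            have := h2 i rfl; omega
          · intro g hg j hj
            rcases List.mem_cons.mp hg with rfl | hg'
            · rw [hfm] at hj; injection hj with hj; subst hj
              exact h2 _ rfl
            · exact h3 g hg' j hj
        · obtain ⟨h1, h2, h3⟩ := ih (some a) b h
          refine ⟨?_, ?_, ?_⟩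
          · rcases h1 with h1 | ⟨g, hg, hgm⟩
            · exact Or.inl h1
            · exact Or.inr ⟨g, List.mem_cons_of_mem _ hg, hgm⟩
          · intro a' ha'; injection ha' with ha'; subst ha'
            exact h2 _ rfl
          · intro g hg j hj
            rcases List.mem_cons.mp hg with rfl | hg'
            · rw [hfm] at hj; injection hj with hj; subst hj
              have := h2 a rfl; omega
            · exact h3 g hg' j hj


theorem pvAnyI_iff_matchN (req : PySem.Set (List Char)) (fl : List (String × String × Bool)) (i : Nat) :
    pvAnyI req fl (i : Int) = fl.any (fun f => pvMatchN req (pvParts f.2.1) i) := rfl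


theorem pvBestN_none (req : PySem.Set (List Char)) (fl : List (String × String × Bool))
    (hb : pvBest req fl none = none) :
    ∀ d : Int, 1 ≤ d → pvAnyI req fl d = false := by
  intro d hd
  obtain ⟨-, hall⟩ := pvBest_none req fl none hb
  have hdn : d = ((d.toNat : Nat) : Int) := (Int.toNat_of_nonneg (by omega)).symm
  rw [hdn, pvAnyI_iff_matchN, List.any_eq_false]
  intro f hf
  simp [pvFirstMatch_none req (pvParts f.2.1) 1 (hall f hf) d.toNat (by omega)]

theorem pvBestN_some (req : PySem.Set (List Char)) (fl : List (String × String × Bool))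
    (b : Nat) (hb : pvBest req fl none = some b) :
    1 ≤ b ∧ pvAnyI req fl (b : Int) = true ∧
      ∀ d : Int, 1 ≤ d → d < (b : Int) → pvAnyI req fl d = false := by
  obtain ⟨h1, -, h3⟩ := pvBest_some req fl none b hb
  rcases h1 with h1 | ⟨f, hf, hfm⟩
  · exact absurd h1 (by simp)
  obtain ⟨hb1, hbm, -⟩ := pvFirstMatch_some req (pvParts f.2.1) 1 b hfm
  refine ⟨hb1, ?_, ?_⟩
  · rw [pvAnyI_iff_matchN]
    exact List.any_eq_true.mpr ⟨f, hf, hbm⟩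
  · intro d hd1 hdb
    have hdn : d = ((d.toNat : Nat) : Int) := (Int.toNat_of_nonneg (by omega)).symm
    rw [hdn, pvAnyI_iff_matchN, List.any_eq_false]
    intro g hg hcon
    rcases hgm : pvFirstMatch req (pvParts g.2.1) 1 with _ | j
    · rw [pvFirstMatch_none req (pvParts g.2.1) 1 hgm d.toNat (by omega)] at hcon
      exact absurd hcon (by simp)
    · obtain ⟨-, -, hjmin⟩ := pvFirstMatch_some req (pvParts g.2.1) 1 j hgm
      have hjk : j ≤ d.toNat := by
        by_contra hlt
        rw [hjmin d.toNat (by omega) (by omega)] at hcon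
        exact absurd hcon (by simp)
      have := h3 g hg j hgm
      omega

theorem pvCore (req : PySem.Set (List Char)) (fl : List (String × String × Bool)) (m : Int) :
    (if pvCheckA req fl then ((fl, true) : List (String × String × Bool) × Bool)
     else pvLoopA req fl (PySem.List.pyRange 1 (m + 1) 1))
    = (if fl.any (fun f => PySem.Set.contains req (pvTop0 f.2.1)) then (fl, true)
       else
         match pvBest req fl none with
         | none => (fl, false)
         | some b => if (b : Int) > m then (fl, false) else (pvBuildB b fl, true)) := by
  rw [pvCheckA_eq]
  by_cases h0 : fl.any (fun f => PySem.Set.contains req (pvTop0 f.2.1)) = true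
  · rw [if_pos h0, if_pos h0]
  · rw [if_neg h0, if_neg h0]
    rcases hb : pvBest req fl none with _ | b
    · exact pvLoopA_none req fl m 1 (fun d hd _ => pvBestN_none req fl hb d hd)
    · obtain ⟨h1, h2, h3⟩ := pvBestN_some req fl b hb
      show pvLoopA req fl (PySem.List.pyRange 1 (m + 1) 1) =
        if (b : Int) > m then (fl, false) else (pvBuildB b fl, true)
      by_cases hbm : (b : Int) > m
      · rw [if_pos hbm]
        exact pvLoopA_none req fl m 1 (fun d hd hdm => h3 d hd (by omega))
      · rw [if_neg hbm]
        rw [pvLoopA_found req fl m 1 (b : Int) (by exact_mod_cast h1) (by omega) h2 h3]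
        rw [pvBuildB_eq req b]

-- ===== VERDICT (by name: the statement is the Claim_ definition above) =====
theorem try_auto_strip_top_level_py_spec : Claim_equal_try_auto_strip_top_level_py := by
  intro fl required m _
  unfold Spec_try_auto_strip_top_level_py try_auto_strip_top_level_py try_auto_strip_top_level_py_alt
  exact pvCore (PySem.Set.ofList (required.map (fun r => PySem.Chars.lower r.toList))) fl m
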